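-- pv_equiv track=rewrite | github.com/jorlyf/ege-informatics | 22 задание/5.py | f
-- ===== SOURCE A (Python) =====
-- def f(s):
--     x = s
--     L = 0; M = 0
--     while x > 0:
--         M = M + 1
--         if x % 4 > 1:
--             L = L + 1
--         x = x // 4
--     return L, M
-- ===== SOURCE B (Python) =====
-- def f(s):
--     if s <= 0:
--         return (0, 0)
--     M = (s.bit_length() + 1) // 2
--     mask = sum(1 << (2 * i + 1) for i in range(M))
--     L = bin(s & mask).count('1')
--     return (L, M)
-- ===== Notes on version B (the rewrite author's own statement) =====
-- stated objective: alternative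
-- what changed: Replaces A's per-digit division loop with a closed form: M from s.bit_length(), and L as the popcount of s masked by the odd bit positions (a base-4 digit exceeds 1 iff its high bit is set).
import Mathlib
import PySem

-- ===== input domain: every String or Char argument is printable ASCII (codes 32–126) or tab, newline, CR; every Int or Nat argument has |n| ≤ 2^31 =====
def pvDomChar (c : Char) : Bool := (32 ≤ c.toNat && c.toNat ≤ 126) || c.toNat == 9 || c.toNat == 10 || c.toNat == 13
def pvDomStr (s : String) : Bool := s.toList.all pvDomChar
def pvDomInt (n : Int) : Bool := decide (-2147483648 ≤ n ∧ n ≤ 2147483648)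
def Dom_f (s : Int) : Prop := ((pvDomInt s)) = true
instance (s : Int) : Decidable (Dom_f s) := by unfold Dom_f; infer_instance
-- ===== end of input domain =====

-- B recomputes A's pair by a closed form (bit_length and an odd-bit mask popcount) instead of A's per-digit division loop; objective: idiomatic/alternative.

-- ===== PORT A =====
-- the while loop of A, state (x, L, M)
def fLoop (x L M : Int) : Int × Int :=
  if h : 0 < x then
    fLoop (PySem.Int.floordiv x 4) (if PySem.Int.mod x 4 > 1 then L + 1 else L) (M + 1)
  else (L, M)
termination_by x.toNat
decreasing_by
  have h4 : PySem.Int.floordiv x 4 = x / 4 := PySem.Int.floordiv_eq_ediv_of_pos (by omega)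
  rw [h4]; omega

def f (s : Int) : Int × Int := fLoop s 0 0

-- ===== PORT B =====
-- port of Python's s.bit_length() (exact for nonnegative s, the only use in Source B)
def bitLen (n : Nat) : Nat := if n = 0 then 0 else bitLen (n / 2) + 1

-- port of bin(x).count('1') (exact for nonnegative x, the only use in Source B)
def popCnt (n : Nat) : Nat := if n = 0 then 0 else popCnt (n / 2) + n % 2

def f_alt (s : Int) : Int × Int :=
  if s ≤ 0 then (0, 0)
  else
    let n := s.toNat
    let M := (bitLen n + 1) / 2
    let mask := (List.range M).foldl (fun a i => a + 1 <<< (2 * i + 1)) 0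
    let L := popCnt (n &&& mask)
    ((L : Int), (M : Int))

-- ===== PRECONDITION & SPEC =====
def Spec_f (s : Int) (out : Int × Int) : Prop := out = f_alt s
instance (s : Int) (out : Int × Int) : Decidable (Spec_f s out) := by unfold Spec_f; infer_instance

-- ===== CLAIM (what is proved, stated in full; the proofs are below) =====
def Claim_equal_f : Prop := ∀ (s : Int), Dom_f s → Spec_f s (f s)

-- ===== LEMMAS AND PROOFS =====

-- number of base-4 digits of n (ghost)
def nd (n : Nat) : Nat := if n = 0 then 0 else nd (n / 4) + 1
-- number of base-4 digits > 1 of n (ghost)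
def lc (n : Nat) : Nat := if n = 0 then 0 else lc (n / 4) + (if n % 4 > 1 then 1 else 0)
-- the mask Source B builds
def maskVal (M : Nat) : Nat := (List.range M).foldl (fun a i => a + 1 <<< (2 * i + 1)) 0

theorem nd_eq_zero (n : Nat) : nd n = 0 ↔ n = 0 := by
  constructor
  · intro h; by_contra hn; rw [nd] at h; simp [hn] at h
  · intro h; subst h; rw [nd]; simp

theorem fLoop_eq (n : Nat) (L M : Int) :
    fLoop (n : Int) L M = (L + (lc n : Int), M + (nd n : Int)) := by
  induction n using Nat.strong_induction_on generalizing L M with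
  | _ n ih =>
    by_cases hn : n = 0
    · subst hn; rw [fLoop]; simp [lc, nd]
    · rw [fLoop]
      have hpos : (0:Int) < (n:Int) := by exact_mod_cast Nat.pos_of_ne_zero hn
      rw [dif_pos hpos]
      have hdiv : PySem.Int.floordiv (n : Int) 4 = ((n / 4 : Nat) : Int) := by
        exact_mod_cast PySem.Int.floordiv_natCast n 4
      have hmod : PySem.Int.mod (n : Int) 4 = ((n % 4 : Nat) : Int) := by
        exact_mod_cast PySem.Int.mod_natCast n 4
      rw [hdiv, hmod, ih (n / 4) (Nat.div_lt_self (Nat.pos_of_ne_zero hn) (by norm_num))]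
      rw [show lc n = lc (n / 4) + (if n % 4 > 1 then 1 else 0) from by rw [lc, if_neg hn],
          show nd n = nd (n / 4) + 1 from by rw [nd, if_neg hn]]
      by_cases hgt : 1 < n % 4
      · rw [if_pos (show (1:Int) < ((n % 4 : Nat) : Int) from by exact_mod_cast hgt), if_pos hgt]
        simp only [Prod.mk.injEq]; push_cast; omega
      · rw [if_neg (show ¬(1:Int) < ((n % 4 : Nat) : Int) from by exact_mod_cast hgt), if_neg hgt]
        simp only [Prod.mk.injEq]; push_cast; omega

theorem bitLen_div4 (n : Nat) (h : 4 ≤ n) : bitLen n = bitLen (n / 4) + 2 := by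
  rw [bitLen, if_neg (by omega), bitLen, if_neg (by omega)]
  rw [Nat.div_div_eq_div_mul]

theorem nd_eq_bitLen (n : Nat) : nd n = (bitLen n + 1) / 2 := by
  induction n using Nat.strong_induction_on with
  | _ n ih =>
    by_cases h0 : n = 0
    · subst h0; rw [nd, bitLen]; simp
    by_cases h4 : n < 4
    · have hnd : nd n = 1 := by
        rw [nd, if_neg h0, show n / 4 = 0 from by omega, nd, if_pos rfl]
      have hbl : bitLen n = 1 ∨ bitLen n = 2 := by
        by_cases h2 : n < 2
        · left
          rw [bitLen, if_neg h0, show n / 2 = 0 from by omega, bitLen, if_pos rfl]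
        · right
          rw [bitLen, if_neg h0, bitLen, if_neg (show ¬n / 2 = 0 from by omega),
              show n / 2 / 2 = 0 from by omega, bitLen, if_pos rfl]
      rw [hnd]; rcases hbl with h | h <;> rw [h]
    · rw [nd, if_neg h0, bitLen_div4 n (by omega),
        ih (n / 4) (Nat.div_lt_self (Nat.pos_of_ne_zero h0) (by norm_num))]
      omega

theorem maskVal_succ (M : Nat) : maskVal (M + 1) = maskVal M + 2 ^ (2 * M + 1) := by
  unfold maskVal
  rw [List.range_succ, List.foldl_append]
  simp [Nat.one_shiftLeft]

theorem maskVal_step (M : Nat) : maskVal (M + 1) = 2 + 4 * maskVal M := by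
  induction M with
  | zero => simp [maskVal]
  | succ M ih =>
    rw [maskVal_succ (M + 1)]
    nth_rewrite 1 [ih]
    rw [maskVal_succ M]
    have h4 : (2:ℕ) ^ (2 * (M + 1) + 1) = 4 * 2 ^ (2 * M + 1) := by ring
    rw [h4]; ring

theorem land_step (n m : Nat) :
    n &&& (2 + 4 * m) = 2 * (n / 2 % 2) + 4 * (n / 4 &&& m) := by
  apply Nat.eq_of_testBit_eq
  intro i
  rw [Nat.testBit_land]
  match i with
  | 0 =>
    simp only [Nat.testBit_eq_decide_div_mod_eq, pow_zero, Nat.div_one]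
    have h1 : (2 + 4 * m) % 2 = 0 := by omega
    have h2 : (2 * (n / 2 % 2) + 4 * (n / 4 &&& m)) % 2 = 0 := by omega
    rw [h1, h2]; simp
  | 1 =>
    simp only [Nat.testBit_eq_decide_div_mod_eq, pow_one]
    have h1 : (2 + 4 * m) / 2 % 2 = 1 := by omega
    have h2 : (2 * (n / 2 % 2) + 4 * (n / 4 &&& m)) / 2 % 2 = n / 2 % 2 := by omega
    rw [h1, h2]; simp
  | (i + 2) =>
    have hp : (2:ℕ) ^ (i + 2) = 4 * 2 ^ i := by ring
    have e1 : (2 + 4 * m) / 2 ^ (i + 2) = m / 2 ^ i := by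
      rw [hp, Nat.mul_comm, ← Nat.div_div_eq_div_mul]
      congr 1; omega
    have e2 : (2 * (n / 2 % 2) + 4 * (n / 4 &&& m)) / 2 ^ (i + 2) = (n / 4 &&& m) / 2 ^ i := by
      rw [hp, Nat.mul_comm, ← Nat.div_div_eq_div_mul]
      congr 1; omega
    have e3 : n / 2 ^ (i + 2) = n / 4 / 2 ^ i := by
      rw [hp, ← Nat.div_div_eq_div_mul]
    have t1 : (2 + 4 * m).testBit (i + 2) = m.testBit i := by
      simp only [Nat.testBit_eq_decide_div_mod_eq]; rw [e1]
    have t2 : (2 * (n / 2 % 2) + 4 * (n / 4 &&& m)).testBit (i + 2) = (n / 4 &&& m).testBit i := by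
      simp only [Nat.testBit_eq_decide_div_mod_eq]; rw [e2]
    have t3 : n.testBit (i + 2) = (n / 4).testBit i := by
      simp only [Nat.testBit_eq_decide_div_mod_eq]; rw [e3]
    rw [t1, t2, t3, Nat.testBit_land]

theorem popCnt_step (a b : Nat) (ha : a ≤ 1) : popCnt (2 * a + 4 * b) = a + popCnt b := by
  by_cases h0 : 2 * a + 4 * b = 0
  · have : a = 0 ∧ b = 0 := by omega
    rw [h0]; rw [this.1, this.2]; rw [popCnt]; simp
  · rw [popCnt, if_neg h0]
    have h2 : (2 * a + 4 * b) % 2 = 0 := by omega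
    have h3 : (2 * a + 4 * b) / 2 = a + 2 * b := by omega
    rw [h2, h3]
    by_cases h4 : a + 2 * b = 0
    · have : a = 0 ∧ b = 0 := by omega
      rw [h4]; rw [this.1, this.2]; rw [popCnt]; simp
    · rw [popCnt, if_neg h4]
      have h5 : (a + 2 * b) / 2 = b := by omega
      have h6 : (a + 2 * b) % 2 = a := by omega
      rw [h5, h6]; omega

theorem count_lemma (M : Nat) : ∀ n, nd n ≤ M → popCnt (n &&& maskVal M) = lc n := by
  induction M with
  | zero =>
    intro n h
    have : n = 0 := (nd_eq_zero n).1 (by omega)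
    subst this
    rw [maskVal]; simp [popCnt, lc]
  | succ M ih =>
    intro n h
    by_cases h0 : n = 0
    · subst h0; simp [popCnt, lc]
    · rw [maskVal_step, land_step, popCnt_step _ _ (by omega)]
      rw [nd, if_neg h0] at h
      rw [ih (n / 4) (by omega)]
      rw [show lc n = lc (n / 4) + (if n % 4 > 1 then 1 else 0) from by rw [lc, if_neg h0]]
      split_ifs with hc <;> omega

theorem f_eq_alt (s : Int) : f s = f_alt s := by
  by_cases hs : s ≤ 0
  · rw [f, fLoop, dif_neg (by omega), f_alt, if_pos hs]
  · have hn : s = ((s.toNat : Nat) : Int) := by omega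
    rw [f, hn, fLoop_eq]
    simp only [zero_add]
    simp only [f_alt, if_neg (show ¬((s.toNat : Nat) : Int) ≤ 0 from by omega)]
    simp only [Int.toNat_natCast]
    rw [show (List.range ((bitLen s.toNat + 1) / 2)).foldl (fun a i => a + 1 <<< (2 * i + 1)) 0
        = maskVal ((bitLen s.toNat + 1) / 2) from rfl]
    rw [← nd_eq_bitLen, count_lemma _ _ le_rfl]

-- ===== VERDICT (by name: the statement is the Claim_ definition above) =====
theorem f_spec : Claim_equal_f := by
  intro s _
  unfold Spec_f
  exact f_eq_alt s
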